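-- pv_equiv track=rewrite | github.com/hope409/TodaysAlgorithm | PGS/pgs_258707/pgs_258705.py | solution
-- ===== SOURCE A (Python) =====
-- def solution(n, tops):
--     # 총 타일 개수
--     total_tiles = 2 * n + 1
--
--     # DP 배열 초기화
--     dp = [0] * (total_tiles + 1)
--     dp[0] = 1  # 초기 조건
--     dp[1] = 1  # 초기 조건
--
--     # 점화식 계산
--     for k in range(2, total_tiles + 1):
--         if k % 2 == 0 and tops[k // 2 - 1]:
--             dp[k] = (dp[k - 1] * 2 + dp[k - 2]) % 10007
--         else:
--             dp[k] = (dp[k - 1] + dp[k - 2]) % 10007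
--
--     answer = dp[total_tiles]
--
--     return answer
-- ===== SOURCE B (Python) =====
-- def solution(n, tops):
--     # transfer-matrix formulation: answer = second component of (M[n-1] @ ... @ M[0]) . (1,1),
--     # with the matrix product computed by balanced divide-and-conquer over the column matrices
--     mats = [((1, 2), (1, 3)) if tops[i] else ((1, 1), (1, 2)) for i in range(n)]
--
--     def mul(x, y):
--         (a, b), (c, d) = x
--         (e, f), (g, h) = y
--         return (((a * e + b * g) % 10007, (a * f + b * h) % 10007),
--                 ((c * e + d * g) % 10007, (c * f + d * h) % 10007))
--
--     def prod(l, r):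
--         if r - l == 0:
--             return ((1, 0), (0, 1))
--         if r - l == 1:
--             return mats[l]
--         m = (l + r) // 2
--         return mul(prod(m, r), prod(l, m))
--
--     p = prod(0, n)
--     return (p[1][0] + p[1][1]) % 10007
-- ===== Notes on version B (the rewrite author's own statement) =====
-- stated objective: alternative
-- what changed: Recast the linear DP over 2n+1 tiles as a product of per-column 2x2 transfer matrices mod 10007 ([[1,1],[1,2]] or [[1,2],[1,3]] per tops[i]), computed by balanced divide-and-conquer and applied to the vector (1,1); no dp array and no sequential recurrence loop.
import Mathlib
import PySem

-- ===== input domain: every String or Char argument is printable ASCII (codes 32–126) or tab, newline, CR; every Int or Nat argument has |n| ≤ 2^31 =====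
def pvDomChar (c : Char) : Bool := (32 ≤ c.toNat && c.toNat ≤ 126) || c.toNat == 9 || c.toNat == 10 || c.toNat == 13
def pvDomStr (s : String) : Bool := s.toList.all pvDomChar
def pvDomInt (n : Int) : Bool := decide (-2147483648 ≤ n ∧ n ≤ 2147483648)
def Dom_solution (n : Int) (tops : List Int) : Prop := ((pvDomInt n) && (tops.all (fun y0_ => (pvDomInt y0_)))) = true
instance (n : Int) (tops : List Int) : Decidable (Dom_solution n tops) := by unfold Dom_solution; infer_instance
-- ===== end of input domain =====

-- B recasts A's linear DP over 2n+1 tiles as a product of per-column 2x2 transfer matrices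
-- mod 10007, computed by balanced divide-and-conquer (objective: alternative formulation).

-- ===== PORT A =====
-- loop body of A (named so the proofs can refer to it; same steps as the Python loop body)
def stepA (tops : List Int) (dp : List Int) (k : Int) : List Int :=
  if PySem.Int.mod k 2 == 0 && PySem.List.pyGetD tops (PySem.Int.floordiv k 2 - 1) 0 != 0 then
    PySem.List.pySetD dp k
      (PySem.Int.mod (PySem.List.pyGetD dp (k - 1) 0 * 2 + PySem.List.pyGetD dp (k - 2) 0) 10007)
  else
    PySem.List.pySetD dp k
      (PySem.Int.mod (PySem.List.pyGetD dp (k - 1) 0 + PySem.List.pyGetD dp (k - 2) 0) 10007)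

def solution (n : Int) (tops : List Int) : Int :=
  let totalTiles : Int := 2 * n + 1
  let dp : List Int := List.replicate (totalTiles + 1).toNat 0
  let dp := PySem.List.pySetD dp 0 1
  let dp := PySem.List.pySetD dp 1 1
  let dp := (PySem.List.pyRange 2 (totalTiles + 1) 1).foldl (stepA tops) dp
  PySem.List.pyGetD dp totalTiles 0

-- ===== PORT B =====
-- mul from Source B: 2x2 matrix product with entries reduced mod 10007
def matMulB (x y : (Int × Int) × (Int × Int)) : (Int × Int) × (Int × Int) :=
  ((PySem.Int.mod (x.1.1 * y.1.1 + x.1.2 * y.2.1) 10007,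
    PySem.Int.mod (x.1.1 * y.1.2 + x.1.2 * y.2.2) 10007),
   (PySem.Int.mod (x.2.1 * y.1.1 + x.2.2 * y.2.1) 10007,
    PySem.Int.mod (x.2.1 * y.1.2 + x.2.2 * y.2.2) 10007))

-- prod from Source B: balanced product mats[r-1] @ ... @ mats[l]
def matProdB (mats : List ((Int × Int) × (Int × Int))) (l r : Int) :
    (Int × Int) × (Int × Int) :=
  if r - l = 0 then ((1, 0), (0, 1))
  else if r - l = 1 then PySem.List.pyGetD mats l ((1, 0), (0, 1))
  else if r - l < 0 then ((1, 0), (0, 1))  -- totality guard: the Python diverges here; unreachable from the top-level call under Pre_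
  else
    matMulB (matProdB mats (PySem.Int.floordiv (l + r) 2) r)
            (matProdB mats l (PySem.Int.floordiv (l + r) 2))
termination_by (r - l).toNat
decreasing_by
  · have h := PySem.Int.floordiv_eq_ediv_of_pos (a := l + r) (b := 2) (by norm_num)
    rw [h]; omega
  · have h := PySem.Int.floordiv_eq_ediv_of_pos (a := l + r) (b := 2) (by norm_num)
    rw [h]; omega

def solution_alt (n : Int) (tops : List Int) : Int :=
  let mats := (PySem.List.pyRange 0 n 1).map (fun i =>
    if PySem.List.pyGetD tops i 0 != 0 then (((1:Int), (2:Int)), ((1:Int), (3:Int)))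
    else (((1:Int), (1:Int)), ((1:Int), (2:Int))))
  let p := matProdB mats 0 n
  PySem.Int.mod (p.2.1 + p.2.2) 10007

-- ===== PRECONDITION & SPEC =====
-- A raises IndexError when n < 0 (dp[0] = 1 on an empty/negative-size list) or when tops has
-- fewer than n elements (tops[k//2 - 1] out of range); Pre_ excludes exactly those inputs.
def Pre_solution (n : Int) (tops : List Int) : Prop := 0 ≤ n ∧ n ≤ (tops.length : Int)
instance (n : Int) (tops : List Int) : Decidable (Pre_solution n tops) := by
  unfold Pre_solution; infer_instance
def pvWitness_solution : Int × List Int := (3, [1, 0, 1])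

def Spec_solution (n : Int) (tops : List Int) (out : Int) : Prop := out = solution_alt n tops
instance (n : Int) (tops : List Int) (out : Int) : Decidable (Spec_solution n tops out) := by
  unfold Spec_solution; infer_instance

-- ===== CLAIM (what is proved, stated in full; the proofs are below) =====
def Claim_equal_solution : Prop := ∀ (n : Int) (tops : List Int), Dom_solution n tops → Pre_solution n tops → Spec_solution n tops (solution n tops)

-- ===== LEMMAS AND PROOFS =====

-- the shared pure recurrence: gRec tops i = (dp[2i], dp[2i+1])
def gRec (tops : List Int) : Nat → Int × Int
  | 0 => (1, 1)
  | i + 1 =>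
    let p := gRec tops i
    let c := if tops.getD i 0 ≠ 0 then PySem.Int.mod (2 * p.2 + p.1) 10007
             else PySem.Int.mod (p.1 + p.2) 10007
    (c, PySem.Int.mod (p.2 + c) 10007)

theorem aInv (n : Int) (tops : List Int) (h0 : 0 ≤ n) (_h1 : n ≤ (tops.length : Int))
    (j : Nat) (hj : (j : Int) ≤ n) :
    ((PySem.List.pyRange 2 (2 * (j : Int) + 2) 1).foldl (stepA tops)
        (PySem.List.pySetD (PySem.List.pySetD (List.replicate (2 * n + 2).toNat 0) 0 1) 1 1)).length
        = (2 * n + 2).toNat ∧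
    PySem.List.pyGetD
      ((PySem.List.pyRange 2 (2 * (j : Int) + 2) 1).foldl (stepA tops)
        (PySem.List.pySetD (PySem.List.pySetD (List.replicate (2 * n + 2).toNat 0) 0 1) 1 1))
      (2 * (j : Int)) 0 = (gRec tops j).1 ∧
    PySem.List.pyGetD
      ((PySem.List.pyRange 2 (2 * (j : Int) + 2) 1).foldl (stepA tops)
        (PySem.List.pySetD (PySem.List.pySetD (List.replicate (2 * n + 2).toNat 0) 0 1) 1 1))
      (2 * (j : Int) + 1) 0 = (gRec tops j).2 := by
  induction j with
  | zero =>
    simp only [Nat.cast_zero, mul_zero, zero_add]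
    rw [PySem.List.pyRange_one_eq_nil (by omega)]
    simp only [List.foldl]
    have hL : (List.replicate (2 * n + 2).toNat (0 : Int)).length = (2 * n + 2).toNat := by simp
    have hn2 : 1 < (2 * n + 2).toNat := by omega
    refine ⟨by simp [PySem.List.length_pySetD], ?_, ?_⟩
    · rw [PySem.List.pySetD_of_nonneg _ 1 (by omega : (0:Int) ≤ 1),
          PySem.List.pySetD_of_nonneg _ 1 (by omega : (0:Int) ≤ 0),
          PySem.List.pyGetD_zero]
      norm_num
      simp [gRec, show 0 < (2 * n + 2).toNat from by omega]
    · rw [PySem.List.pySetD_of_nonneg _ 1 (by omega : (0:Int) ≤ 1),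
          PySem.List.pySetD_of_nonneg _ 1 (by omega : (0:Int) ≤ 0),
          show (1 : Int) = ((1 : Nat) : Int) from by norm_num,
          PySem.List.pyGetD_natCast]
      norm_num
      simp [gRec, hn2]
  | succ j ih =>
    obtain ⟨ihlen, iha, ihb⟩ := ih (by push_cast at hj ⊢; omega)
    have hsplit : PySem.List.pyRange 2 (2 * ((j + 1 : Nat) : Int) + 2) 1
        = PySem.List.pyRange 2 (2 * (j : Int) + 2) 1 ++ [2 * (j : Int) + 2] ++ [2 * (j : Int) + 3] := by
      rw [show (2 * ((j + 1 : Nat) : Int) + 2) = (2 * (j : Int) + 3) + 1 from by push_cast; ring,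
          PySem.List.pyRange_one_succ_right (by omega),
          show (2 * (j : Int) + 3) = (2 * (j : Int) + 2) + 1 from by ring,
          PySem.List.pyRange_one_succ_right (by omega)]
    rw [hsplit, List.foldl_append, List.foldl_append]
    set dpj := (PySem.List.pyRange 2 (2 * (j : Int) + 2) 1).foldl (stepA tops)
        (PySem.List.pySetD (PySem.List.pySetD (List.replicate (2 * n + 2).toNat 0) 0 1) 1 1) with hdpj
    simp only [List.foldl]
    have hmod1 : PySem.Int.mod (2 * (j : Int) + 2) 2 = 0 := by
      rw [PySem.Int.mod_eq_emod_of_pos (by omega)]; omega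
    have hdiv1 : PySem.Int.floordiv (2 * (j : Int) + 2) 2 - 1 = (j : Int) := by
      rw [PySem.Int.floordiv_eq_ediv_of_pos (by omega)]; omega
    have hstep1 : stepA tops dpj (2 * (j : Int) + 2)
        = PySem.List.pySetD dpj (2 * (j : Int) + 2)
            (if tops.getD j 0 ≠ 0 then
               PySem.Int.mod (2 * (gRec tops j).2 + (gRec tops j).1) 10007
             else
               PySem.Int.mod ((gRec tops j).1 + (gRec tops j).2) 10007) := by
      unfold stepA
      rw [hmod1, hdiv1,
          show (2 * (j : Int) + 2 - 1) = 2 * (j : Int) + 1 from by ring,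
          show (2 * (j : Int) + 2 - 2) = 2 * (j : Int) from by ring, iha, ihb]
      simp only [PySem.List.pyGetD_natCast, bne_iff_ne, ne_eq, beq_self_eq_true, Bool.true_and]
      split_ifs <;> simp_all <;> ring_nf
    have c0 : (2 * (j : Int)) = ((2 * j : Nat) : Int) := by push_cast; ring
    have c1 : (2 * (j : Int) + 1) = ((2 * j + 1 : Nat) : Int) := by push_cast; ring
    have c2 : (2 * (j : Int) + 2) = ((2 * j + 2 : Nat) : Int) := by push_cast; ring
    have g0 : (2 * ((j + 1 : Nat) : Int)) = ((2 * j + 2 : Nat) : Int) := by push_cast; ring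
    have g1 : (2 * ((j + 1 : Nat) : Int) + 1) = ((2 * j + 3 : Nat) : Int) := by push_cast; ring
    have hlen2 : 2 * j + 2 < dpj.length := by rw [ihlen]; omega
    rw [c1] at ihb
    have hstep2 : ∀ (c : Int), stepA tops (PySem.List.pySetD dpj ((2 * j + 2 : Nat) : Int) c) (2 * (j : Int) + 3)
        = PySem.List.pySetD (PySem.List.pySetD dpj ((2 * j + 2 : Nat) : Int) c) ((2 * j + 3 : Nat) : Int)
            (PySem.Int.mod ((gRec tops j).2 + c) 10007) := by
      intro c
      unfold stepA
      have hm : PySem.Int.mod (2 * (j : Int) + 3) 2 = 1 := by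
        rw [PySem.Int.mod_eq_emod_of_pos (by omega)]; omega
      rw [hm, show (2 * (j : Int) + 3 - 1) = ((2 * j + 2 : Nat) : Int) from by push_cast; ring,
          show (2 * (j : Int) + 3 - 2) = ((2 * j + 1 : Nat) : Int) from by push_cast; ring,
          show (2 * (j : Int) + 3) = ((2 * j + 3 : Nat) : Int) from by push_cast; ring,
          PySem.List.pyGetD_pySetD_natCast dpj (2 * j + 2) (2 * j + 2) c 0 hlen2,
          PySem.List.pyGetD_pySetD_natCast dpj (2 * j + 2) (2 * j + 1) c 0 hlen2]
      simp [Int.add_comm]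
      rw [show ((1 : Int) + 2 * (j : Int)) = ((2 * j + 1 : Nat) : Int) from by push_cast; ring, ihb]
    rw [hstep1, c2, hstep2]
    rw [g1, g0]
    have hlen3' : 2 * j + 3 < (PySem.List.pySetD dpj ((2 * j + 2 : Nat) : Int)
        (if tops.getD j 0 ≠ 0 then PySem.Int.mod (2 * (gRec tops j).2 + (gRec tops j).1) 10007
         else PySem.Int.mod ((gRec tops j).1 + (gRec tops j).2) 10007)).length := by
      rw [PySem.List.length_pySetD, ihlen]; omega
    refine ⟨by simp [PySem.List.length_pySetD, ihlen], ?_, ?_⟩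
    · rw [PySem.List.pyGetD_pySetD_natCast _ (2 * j + 3) (2 * j + 2) _ 0 hlen3',
          if_neg (by omega),
          PySem.List.pyGetD_pySetD_natCast dpj (2 * j + 2) (2 * j + 2) _ 0 hlen2,
          if_pos rfl]
      simp [gRec]
    · rw [PySem.List.pyGetD_pySetD_natCast _ (2 * j + 3) (2 * j + 3) _ 0 hlen3',
          if_pos rfl]
      simp [gRec]

theorem a_eq_gRec (n : Int) (tops : List Int) (h0 : 0 ≤ n) (h1 : n ≤ (tops.length : Int)) :
    solution n tops = (gRec tops n.toNat).2 := by
  simp only [solution]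
  obtain ⟨hlen, hfst, hsnd⟩ := aInv n tops h0 h1 n.toNat (by omega)
  have e : (2 * n + 2 : Int) = 2 * ((n.toNat : Nat) : Int) + 2 := by omega
  rw [e] at hsnd
  have e1 : (2 * n + 1 + 1 : Int) = 2 * ((n.toNat : Nat) : Int) + 2 := by omega
  have e2 : (2 * n + 1 : Int) = 2 * ((n.toNat : Nat) : Int) + 1 := by omega
  rw [e1, e2]
  exact hsnd

-- ----- B-side lemmas: the balanced matrix product -----

-- modular-arithmetic keys
theorem keyL (a b x y : Int) : (x % 10007 * a + y % 10007 * b) % 10007 = (x * a + y * b) % 10007 :=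
  (Int.ModEq.mul_right a (Int.emod_emod_of_dvd x dvd_rfl)).add
    (Int.ModEq.mul_right b (Int.emod_emod_of_dvd y dvd_rfl))

theorem keyR (a b x y : Int) : (a * (x % 10007) + b * (y % 10007)) % 10007 = (a * x + b * y) % 10007 :=
  (Int.ModEq.mul_left a (Int.emod_emod_of_dvd x dvd_rfl)).add
    (Int.ModEq.mul_left b (Int.emod_emod_of_dvd y dvd_rfl))

def MatRed (x : (Int × Int) × (Int × Int)) : Prop :=
  (0 ≤ x.1.1 ∧ x.1.1 < 10007) ∧ (0 ≤ x.1.2 ∧ x.1.2 < 10007) ∧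
  (0 ≤ x.2.1 ∧ x.2.1 < 10007) ∧ (0 ≤ x.2.2 ∧ x.2.2 < 10007)

theorem matMulB_emod (x y : (Int × Int) × (Int × Int)) :
    matMulB x y =
      (((x.1.1 * y.1.1 + x.1.2 * y.2.1) % 10007, (x.1.1 * y.1.2 + x.1.2 * y.2.2) % 10007),
       ((x.2.1 * y.1.1 + x.2.2 * y.2.1) % 10007, (x.2.1 * y.1.2 + x.2.2 * y.2.2) % 10007)) := by
  simp only [matMulB, PySem.Int.mod_eq_emod_of_pos (show (0:Int) < 10007 by norm_num)]

theorem matMulB_red (x y : (Int × Int) × (Int × Int)) : MatRed (matMulB x y) := by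
  rw [matMulB_emod]
  refine ⟨⟨?_, ?_⟩, ⟨?_, ?_⟩, ⟨?_, ?_⟩, ⟨?_, ?_⟩⟩ <;>
    first
      | exact Int.emod_nonneg _ (by norm_num)
      | exact Int.emod_lt_of_pos _ (by norm_num)

theorem matMulB_assoc (x y z : (Int × Int) × (Int × Int)) :
    matMulB (matMulB x y) z = matMulB x (matMulB y z) := by
  simp only [matMulB_emod, Prod.mk.injEq]
  refine ⟨⟨?_, ?_⟩, ?_, ?_⟩ <;> · rw [keyL, keyR]; congr 1; ring

theorem matMulB_one_left (x : (Int × Int) × (Int × Int)) (h : MatRed x) :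
    matMulB (((1:Int), (0:Int)), ((0:Int), (1:Int))) x = x := by
  obtain ⟨⟨h1, h2⟩, ⟨h3, h4⟩, ⟨h5, h6⟩, h7, h8⟩ := h
  rw [matMulB_emod]
  simp only [one_mul, zero_mul, add_zero, zero_add]
  rw [Int.emod_eq_of_lt h1 h2, Int.emod_eq_of_lt h3 h4,
      Int.emod_eq_of_lt h5 h6, Int.emod_eq_of_lt h7 h8]

theorem matMulB_one_right (x : (Int × Int) × (Int × Int)) (h : MatRed x) :
    matMulB x (((1:Int), (0:Int)), ((0:Int), (1:Int))) = x := by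
  obtain ⟨⟨h1, h2⟩, ⟨h3, h4⟩, ⟨h5, h6⟩, h7, h8⟩ := h
  rw [matMulB_emod]
  simp only [mul_one, mul_zero, add_zero, zero_add]
  rw [Int.emod_eq_of_lt h1 h2, Int.emod_eq_of_lt h3 h4,
      Int.emod_eq_of_lt h5 h6, Int.emod_eq_of_lt h7 h8]

-- left-to-right product M[last] @ ... @ M[first]
def matF (xs : List ((Int × Int) × (Int × Int))) : (Int × Int) × (Int × Int) :=
  xs.foldl (fun acc m => matMulB m acc) (((1:Int), (0:Int)), ((0:Int), (1:Int)))

theorem matF_red (xs : List ((Int × Int) × (Int × Int))) : MatRed (matF xs) := by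
  unfold matF
  induction xs using List.reverseRecOn with
  | nil => exact ⟨⟨by norm_num, by norm_num⟩, ⟨by norm_num, by norm_num⟩,
                  ⟨by norm_num, by norm_num⟩, by norm_num, by norm_num⟩
  | append_singleton ys y _ => rw [List.foldl_append]; exact matMulB_red _ _

theorem matF_snoc (ys : List ((Int × Int) × (Int × Int))) (y : (Int × Int) × (Int × Int)) :
    matF (ys ++ [y]) = matMulB y (matF ys) := by
  unfold matF
  rw [List.foldl_append]
  simp only [List.foldl]

theorem matF_append (xs ys : List ((Int × Int) × (Int × Int))) :
    matF (xs ++ ys) = matMulB (matF ys) (matF xs) := by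
  induction ys using List.reverseRecOn with
  | nil =>
    rw [List.append_nil]
    exact (matMulB_one_left _ (matF_red xs)).symm
  | append_singleton zs z ih =>
    rw [← List.append_assoc, matF_snoc, matF_snoc, ih, ← matMulB_assoc]

theorem matF_singleton (x : (Int × Int) × (Int × Int)) (h : MatRed x) : matF [x] = x := by
  simp [matF, matMulB_one_right x h]

-- the balanced product equals the straight product over the slice
theorem matProdB_eq (mats : List ((Int × Int) × (Int × Int)))
    (hred : ∀ x ∈ mats, MatRed x) :
    ∀ (k : Nat) (l r : Int), (r - l).toNat = k → 0 ≤ l → l ≤ r → r ≤ (mats.length : Int) →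
      matProdB mats l r = matF ((mats.drop l.toNat).take (r - l).toNat) := by
  intro k
  induction k using Nat.strong_induction_on with
  | _ k ih =>
    intro l r hk h0 hlr hr
    by_cases he0 : r - l = 0
    · rw [matProdB, if_pos he0, he0]
      simp [matF]
    · by_cases he1 : r - l = 1
      · rw [matProdB, if_neg he0, if_pos he1, he1]
        have hlt : l.toNat < mats.length := by omega
        rw [PySem.List.pyGetD_eq_getElem _ _ h0 (by exact_mod_cast (by omega : l < (mats.length : Int))),
            List.drop_eq_getElem_cons hlt]
        simp only [Int.toNat_one, List.take_succ_cons, List.take_zero]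
        exact (matF_singleton _ (hred _ (List.getElem_mem hlt))).symm
      · have h2 : 2 ≤ r - l := by omega
        have hdiv : PySem.Int.floordiv (l + r) 2 = (l + r) / 2 :=
          PySem.Int.floordiv_eq_ediv_of_pos (by norm_num)
        have hmb : l < PySem.Int.floordiv (l + r) 2 ∧ PySem.Int.floordiv (l + r) 2 < r := by
          rw [hdiv]; omega
        rw [matProdB, if_neg he0, if_neg he1, if_neg (by omega)]
        rw [ih (r - PySem.Int.floordiv (l + r) 2).toNat (by omega) _ r rfl (by omega) (by omega) hr,
            ih (PySem.Int.floordiv (l + r) 2 - l).toNat (by omega) l _ rfl h0 (by omega) (by omega),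
            ← matF_append]
        congr 1
        have hsum : (r - l).toNat
            = (PySem.Int.floordiv (l + r) 2 - l).toNat + (r - PySem.Int.floordiv (l + r) 2).toNat := by
          omega
        rw [hsum, List.take_add]
        congr 1
        rw [List.drop_drop,
            show l.toNat + (PySem.Int.floordiv (l + r) 2 - l).toNat
                = (PySem.Int.floordiv (l + r) 2).toNat from by omega]

-- the per-column transfer matrix, over a Nat index
def colMat (tops : List Int) (i : Nat) : (Int × Int) × (Int × Int) :=
  if tops.getD i 0 ≠ 0 then (((1:Int), (2:Int)), ((1:Int), (3:Int)))
  else (((1:Int), (1:Int)), ((1:Int), (2:Int)))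

theorem colMat_red (tops : List Int) (i : Nat) : MatRed (colMat tops i) := by
  unfold colMat MatRed; split_ifs <;> norm_num

theorem keyAdd (x y : Int) : (x % 10007 + y % 10007) % 10007 = (x + y) % 10007 :=
  (Int.add_emod x y 10007).symm

-- gRec equals the transfer-matrix product applied to the vector (1,1)
theorem gRec_eq_matF (tops : List Int) (j : Nat) :
    gRec tops j =
      (((matF ((List.range j).map (colMat tops))).1.1 + (matF ((List.range j).map (colMat tops))).1.2) % 10007,
       ((matF ((List.range j).map (colMat tops))).2.1 + (matF ((List.range j).map (colMat tops))).2.2) % 10007) := by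
  induction j with
  | zero => simp [gRec, matF]
  | succ j ih =>
    rw [List.range_succ, List.map_append, matF_append, List.map_singleton,
        matF_singleton _ (colMat_red tops j)]
    set P := matF ((List.range j).map (colMat tops)) with hP
    show gRec tops (j + 1) = _
    simp only [gRec, ih, colMat]
    by_cases ht : tops.getD j 0 ≠ 0
    · rw [if_pos ht, if_pos ht, matMulB_emod]
      simp only [PySem.Int.mod_eq_emod_of_pos (show (0:Int) < 10007 by norm_num), Prod.mk.injEq]
      rw [show (2 * ((P.2.1 + P.2.2) % 10007) + (P.1.1 + P.1.2) % 10007)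
            = (2 * ((P.2.1 + P.2.2) % 10007) + 1 * ((P.1.1 + P.1.2) % 10007)) from by ring,
          keyR 2 1 (P.2.1 + P.2.2) (P.1.1 + P.1.2)]
      refine ⟨?_, ?_⟩
      · rw [keyAdd (1 * P.1.1 + 2 * P.2.1) (1 * P.1.2 + 2 * P.2.2)]
        congr 1; ring
      · rw [keyAdd (P.2.1 + P.2.2) (2 * (P.2.1 + P.2.2) + 1 * (P.1.1 + P.1.2)),
            keyAdd (1 * P.1.1 + 3 * P.2.1) (1 * P.1.2 + 3 * P.2.2)]
        congr 1; ring
    · rw [if_neg ht, if_neg ht, matMulB_emod]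
      simp only [PySem.Int.mod_eq_emod_of_pos (show (0:Int) < 10007 by norm_num), Prod.mk.injEq]
      rw [keyAdd (P.1.1 + P.1.2) (P.2.1 + P.2.2)]
      refine ⟨?_, ?_⟩
      · rw [keyAdd (1 * P.1.1 + 1 * P.2.1) (1 * P.1.2 + 1 * P.2.2)]
        congr 1; ring
      · rw [keyAdd (P.2.1 + P.2.2) (P.1.1 + P.1.2 + (P.2.1 + P.2.2)),
            keyAdd (1 * P.1.1 + 2 * P.2.1) (1 * P.1.2 + 2 * P.2.2)]
        congr 1; ring

-- B's mats list is the colMat list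
theorem mats_eq (n : Int) (tops : List Int) (h0 : 0 ≤ n) :
    (PySem.List.pyRange 0 n 1).map (fun i =>
        if PySem.List.pyGetD tops i 0 != 0 then (((1:Int), (2:Int)), ((1:Int), (3:Int)))
        else (((1:Int), (1:Int)), ((1:Int), (2:Int))))
      = (List.range n.toNat).map (colMat tops) := by
  rw [show n = (n.toNat : Int) from by omega, PySem.List.pyRange_zero_natCast, List.map_map]
  refine List.map_congr_left fun i _ => ?_
  simp [colMat, PySem.List.pyGetD_natCast, Function.comp]

theorem alt_eq_matF (n : Int) (tops : List Int) (h0 : 0 ≤ n) :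
    solution_alt n tops =
      ((matF ((List.range n.toNat).map (colMat tops))).2.1 +
       (matF ((List.range n.toNat).map (colMat tops))).2.2) % 10007 := by
  simp only [solution_alt]
  rw [mats_eq n tops h0]
  have hlen : (((List.range n.toNat).map (colMat tops)).length : Int) = (n.toNat : Int) := by simp
  have hred : ∀ x ∈ (List.range n.toNat).map (colMat tops), MatRed x := by
    intro x hx
    obtain ⟨i, _, rfl⟩ := List.mem_map.mp hx
    exact colMat_red tops i
  rw [matProdB_eq _ hred (n - 0).toNat 0 n rfl le_rfl (by omega) (by rw [hlen]; omega)]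
  simp only [Int.toNat_zero, List.drop_zero, sub_zero]
  rw [List.take_of_length_le (by simp)]
  rw [PySem.Int.mod_eq_emod_of_pos (by norm_num)]

-- ===== VERDICT (by name: the statement is the Claim_ definition above) =====
theorem solution_spec : Claim_equal_solution := by
  intro n tops _ hpre
  obtain ⟨h0, h1⟩ := hpre
  unfold Spec_solution
  rw [a_eq_gRec n tops h0 h1, gRec_eq_matF tops n.toNat, alt_eq_matF n tops h0]
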